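-- pv_equiv track=rewrite | github.com/pprahlad/aws-elastic-beanstalk-cli | ebcli/lib/utils.py | list_to_columns
-- ===== SOURCE A (Python) =====
-- def list_to_columns(lst):
--     COLUMN_NUM = 3
--     assert len(lst) > COLUMN_NUM, "List size must be greater than {0}".\
--         format(COLUMN_NUM)
--     remainder = len(lst) % COLUMN_NUM
--     column_size = len(lst) // COLUMN_NUM
--     if remainder != 0:
--         column_size += 1
--     colunms = [[] for i in range(0, COLUMN_NUM)]
--     index = 0
--     stop = column_size
--     for x in range(0, COLUMN_NUM):
--         colunms[x] += lst[index:stop]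
--         index = stop
--         stop += column_size
--     return colunms
-- ===== SOURCE B (Python) =====
-- def list_to_columns(lst):
--     COLUMN_NUM = 3
--     assert len(lst) > COLUMN_NUM, "List size must be greater than {0}".\
--         format(COLUMN_NUM)
--     column_size = -(-len(lst) // COLUMN_NUM)  # ceiling division
--     columns = [[] for _ in range(COLUMN_NUM)]
--     for i, x in enumerate(lst):
--         columns[i // column_size].append(x)
--     return columns
-- ===== Notes on version B (the rewrite author's own statement) =====
-- stated objective: alternative
-- what changed: B distributes elements one by one in a single enumerate pass, routing each element to column i // ceil(len/3) and appending, instead of A's three contiguous slice assignments with running index/stop counters.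
import Mathlib
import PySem

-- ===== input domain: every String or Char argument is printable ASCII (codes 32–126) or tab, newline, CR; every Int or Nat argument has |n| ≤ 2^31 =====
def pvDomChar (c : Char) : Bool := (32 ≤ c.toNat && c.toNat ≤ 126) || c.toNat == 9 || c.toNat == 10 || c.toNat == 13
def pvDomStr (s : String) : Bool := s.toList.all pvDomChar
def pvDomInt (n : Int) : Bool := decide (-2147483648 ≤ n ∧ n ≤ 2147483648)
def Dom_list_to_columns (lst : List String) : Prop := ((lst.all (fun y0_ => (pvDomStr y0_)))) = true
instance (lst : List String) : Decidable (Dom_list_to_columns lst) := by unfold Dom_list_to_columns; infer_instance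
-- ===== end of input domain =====

-- B routes each element to its column by integer division over one enumerate pass instead of
-- taking three contiguous slices (objective: alternative decomposition, same cost).

-- ===== PORT A =====
def list_to_columns (lst : List String) : List (List String) :=
  -- COLUMN_NUM = 3; assert len(lst) > 3 is excluded by Pre_ (AssertionError)
  let remainder := PySem.Int.mod (PySem.List.len lst) 3
  let column_size0 := PySem.Int.floordiv (PySem.List.len lst) 3
  let column_size := if remainder ≠ 0 then column_size0 + 1 else column_size0
  let colunms : List (List String) := (PySem.List.pyRange 0 3 1).map (fun _ => [])
  -- for x in range(0, 3): colunms[x] += lst[index:stop]; index = stop; stop += column_size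
  -- x.toNat is exact here: x ∈ {0,1,2}
  let res := (PySem.List.pyRange 0 3 1).foldl
    (fun (st : List (List String) × Int × Int) x =>
      (st.1.modify x.toNat (· ++ PySem.List.slice lst (some st.2.1) (some st.2.2)),
       st.2.2, st.2.2 + column_size))
    (colunms, 0, column_size)
  res.1

-- ===== PORT B =====
def list_to_columns_alt (lst : List String) : List (List String) :=
  -- column_size = -(-len(lst) // 3)  (ceiling division)
  let column_size := -(PySem.Int.floordiv (-(PySem.List.len lst)) 3)
  let columns : List (List String) := (PySem.List.pyRange 0 3 1).map (fun _ => [])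
  -- for i, x in enumerate(lst): columns[i // column_size].append(x)
  -- (i // column_size).toNat is exact here: the quotient is ≥ 0
  (PySem.List.enumerate lst 0).foldl
    (fun cols p => cols.modify (PySem.Int.floordiv p.1 column_size).toNat (· ++ [p.2]))
    columns

-- ===== PRECONDITION & SPEC =====
-- Pre_ excludes lists of length ≤ 3, on which A's (and B's) assert raises AssertionError.
def Pre_list_to_columns (lst : List String) : Prop := 3 < lst.length
instance (lst : List String) : Decidable (Pre_list_to_columns lst) := by unfold Pre_list_to_columns; infer_instance
def pvWitness_list_to_columns : List String := ["a", "b", "c", "d"]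

def Spec_list_to_columns (lst : List String) (out : List (List String)) : Prop := out = list_to_columns_alt lst
instance (lst : List String) (out : List (List String)) : Decidable (Spec_list_to_columns lst out) := by unfold Spec_list_to_columns; infer_instance

-- ===== CLAIM (what is proved, stated in full; the proofs are below) =====
def Claim_equal_list_to_columns : Prop := ∀ (lst : List String), Dom_list_to_columns lst → Pre_list_to_columns lst → Spec_list_to_columns lst (list_to_columns lst)

-- ===== LEMMAS AND PROOFS =====

theorem modify3_zero {α : Type} (f : α → α) (a b c : α) : [a, b, c].modify 0 f = [f a, b, c] := rfl
theorem modify3_one {α : Type} (f : α → α) (a b c : α) : [a, b, c].modify 1 f = [a, f b, c] := rfl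
theorem modify3_two {α : Type} (f : α → α) (a b c : α) : [a, b, c].modify 2 f = [a, b, f c] := rfl

-- B's routing fold, characterised for an arbitrary start index s and accumulator columns.
theorem bfold_char (cs : Nat) (hcs : 0 < cs) :
    ∀ (xs : List String) (s : Nat) (c0 c1 c2 : List String), s + xs.length ≤ 3 * cs →
    (PySem.List.enumerate xs (s : Int)).foldl
      (fun cols p => cols.modify (PySem.Int.floordiv p.1 (cs : Int)).toNat (· ++ [p.2]))
      [c0, c1, c2]
    = [c0 ++ xs.take (cs - s),
       c1 ++ (xs.drop (cs - s)).take ((2 * cs - s) - (cs - s)),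
       c2 ++ xs.drop (2 * cs - s)] := by
  intro xs
  induction xs with
  | nil => intro s c0 c1 c2 _; simp [PySem.List.enumerate_nil]
  | cons x xs ih =>
    intro s c0 c1 c2 hle
    rw [PySem.List.enumerate_cons]
    have hc : ((s : Int) + 1) = ((s + 1 : Nat) : Int) := by push_cast; ring
    simp only [List.foldl_cons, PySem.Int.floordiv_natCast, Int.toNat_natCast, hc]
    rcases Nat.lt_or_ge s cs with h0 | h1
    · have hdiv : s / cs = 0 := Nat.div_eq_of_lt h0
      rw [hdiv, modify3_zero]
      rw [ih (s + 1) (c0 ++ [x]) c1 c2 (by simpa [Nat.add_right_comm] using hle)]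
      have e1 : cs - s = (cs - (s + 1)) + 1 := by omega
      have e2 : (2 * cs - s) - (cs - s) = (2 * cs - (s + 1)) - (cs - (s + 1)) := by omega
      have e3 : 2 * cs - s = (2 * cs - (s + 1)) + 1 := by omega
      rw [e2, e1, e3]
      simp [List.take_succ_cons, List.append_assoc]
    · rcases Nat.lt_or_ge s (2 * cs) with h2 | h3
      · have hdiv : s / cs = 1 := Nat.div_eq_of_lt_le (by omega) (by omega)
        rw [hdiv, modify3_one]
        rw [ih (s + 1) c0 (c1 ++ [x]) c2 (by simpa [Nat.add_right_comm] using hle)]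
        have e1 : cs - s = 0 := by omega
        have e1' : cs - (s + 1) = 0 := by omega
        have e2 : (2 * cs - s) - (cs - s) = ((2 * cs - (s + 1)) - (cs - (s + 1))) + 1 := by omega
        have e3 : 2 * cs - s = (2 * cs - (s + 1)) + 1 := by omega
        rw [e2, e3, e1, e1']
        simp [List.take_succ_cons, List.append_assoc]
      · have hs3 : s < 3 * cs := by
          have : 1 ≤ (x :: xs).length := by simp
          omega
        have hdiv : s / cs = 2 := Nat.div_eq_of_lt_le (by omega) (by omega)
        rw [hdiv, modify3_two]
        rw [ih (s + 1) c0 c1 (c2 ++ [x]) (by simpa [Nat.add_right_comm] using hle)]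
        have e1 : cs - s = 0 := by omega
        have e1' : cs - (s + 1) = 0 := by omega
        have e2 : 2 * cs - s = 0 := by omega
        have e2' : 2 * cs - (s + 1) = 0 := by omega
        rw [e1, e1', e2, e2']
        simp [List.append_assoc]

-- ===== VERDICT (by name: the statement is the Claim_ definition above) =====
theorem list_to_columns_spec : Claim_equal_list_to_columns := by
  intro lst _ hpre
  unfold Spec_list_to_columns list_to_columns list_to_columns_alt
  set n : Nat := lst.length with hn
  have hn3 : 3 < n := hpre
  set cs : Nat := (n + 2) / 3 with hcs
  have hcs0 : 0 < cs := by omega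
  have hn3cs : n ≤ 3 * cs := by omega
  -- both column sizes equal ↑cs
  have hlen : PySem.List.len lst = (n : Int) := by simp [PySem.List.len, hn]
  have hA : (if PySem.Int.mod (PySem.List.len lst) 3 ≠ 0 then
        PySem.Int.floordiv (PySem.List.len lst) 3 + 1
      else PySem.Int.floordiv (PySem.List.len lst) 3) = (cs : Int) := by
    rw [hlen]
    have h1 : PySem.Int.mod (n : Int) 3 = ((n % 3 : Nat) : Int) := by
      exact_mod_cast PySem.Int.mod_natCast n 3
    have h2 : PySem.Int.floordiv (n : Int) 3 = ((n / 3 : Nat) : Int) := by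
      exact_mod_cast PySem.Int.floordiv_natCast n 3
    rw [h1, h2]
    by_cases h : n % 3 = 0
    · simp [h]; omega
    · rw [if_pos (by exact_mod_cast h)]; omega
  have hB : -(PySem.Int.floordiv (-(PySem.List.len lst)) 3) = (cs : Int) := by
    rw [hlen, (PySem.Int.neg_floordiv_neg_eq_iff_of_pos (by norm_num) :
          -PySem.Int.floordiv (-(n : Int)) 3 = (cs : Int) ↔ _)]
    constructor <;> omega
  simp only [hA, hB]
  -- evaluate both sides
  have hrange : PySem.List.pyRange 0 3 1 = [0, 1, 2] := by decide
  rw [hrange]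
  simp only [List.map, List.foldl]
  have hs1 : PySem.List.slice lst (some 0) (some (cs : Int)) = (lst.drop 0).take (cs - 0) := by
    exact_mod_cast PySem.List.slice_natCast lst 0 cs
  have hc2 : (cs : Int) + (cs : Int) = ((2 * cs : Nat) : Int) := by push_cast; ring
  have hc3 : ((2 * cs : Nat) : Int) + (cs : Int) = ((3 * cs : Nat) : Int) := by push_cast; ring
  have hs2 : PySem.List.slice lst (some (cs : Int)) (some ((2 * cs : Nat) : Int))
      = (lst.drop cs).take (2 * cs - cs) := PySem.List.slice_natCast lst cs (2 * cs)
  have hs3 : PySem.List.slice lst (some ((2 * cs : Nat) : Int)) (some ((3 * cs : Nat) : Int))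
      = (lst.drop (2 * cs)).take (3 * cs - 2 * cs) := PySem.List.slice_natCast lst (2 * cs) (3 * cs)
  rw [hc2, hc3, hs1, hs2, hs3]
  have hBfold := bfold_char cs hcs0 lst 0 [] [] [] (by omega)
  simp only [Nat.cast_zero] at hBfold
  rw [hBfold]
  norm_num [modify3_zero, modify3_one, modify3_two]
  have hthird : (lst.drop (2 * cs)).take (3 * cs - 2 * cs) = lst.drop (2 * cs) := by
    apply List.take_of_length_le
    simp; omega
  rw [hthird]
  simp
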